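-- pv_equiv track=rewrite | github.com/fmcooper/matchingproblems | matchingproblems/generator/generator_shared.py | create_quotas
-- ===== SOURCE A (Python) =====
-- def create_quotas(n, sum_q):
--     """Returns evenly distributed quotas.
--
--     Args:
--         n: The number of agents.
--         sum_q: The sum of quotas to distribute.
--
--     Returns:
--         Evenly distributed upper and lower quotas.
--     """
--     quotas = []
--
--     quotient = int(sum_q / n)
--     remainder = int(sum_q % n)
--     for i in range(n):
--         quotas.append(quotient)
--         if i < remainder:
--             quotas[i] += 1
--
--     return quotas
-- ===== SOURCE B (Python) =====
-- def create_quotas(n, sum_q):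
--     """Returns evenly distributed quotas.
--
--     Greedy single pass over a shrinking problem: each agent in turn receives
--     the ceiling of (remaining sum / remaining agents); no global quotient or
--     remainder is ever computed, and the quotas always sum to sum_q.
--     """
--     quotas = []
--     remaining = sum_q
--     k = n
--     while k > 0:
--         share = -((-remaining) // k)
--         quotas.append(share)
--         remaining -= share
--         k -= 1
--     return quotas
-- ===== Notes on version B (the rewrite author's own statement) =====
-- stated objective: alternative
-- what changed: Replaces A's precomputed quotient/remainder loop by a greedy shrinking-problem pass: each agent takes the ceiling of remaining_sum/remaining_agents, which is subtracted before the next agent.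
-- intended difference: For n > 0 and negative sum_q not divisible by n, A mixes truncating division with floor modulo and returns quotas that sum to more than sum_q (e.g. A(3,-7)=[-1,-1,-2], sum -4); B returns [-2,-2,-3], which sums to sum_q as intended. — e.g. on create_quotas(3, -7): A returns [-1, -1, -2], B returns [-2, -2, -3]
import Mathlib
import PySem

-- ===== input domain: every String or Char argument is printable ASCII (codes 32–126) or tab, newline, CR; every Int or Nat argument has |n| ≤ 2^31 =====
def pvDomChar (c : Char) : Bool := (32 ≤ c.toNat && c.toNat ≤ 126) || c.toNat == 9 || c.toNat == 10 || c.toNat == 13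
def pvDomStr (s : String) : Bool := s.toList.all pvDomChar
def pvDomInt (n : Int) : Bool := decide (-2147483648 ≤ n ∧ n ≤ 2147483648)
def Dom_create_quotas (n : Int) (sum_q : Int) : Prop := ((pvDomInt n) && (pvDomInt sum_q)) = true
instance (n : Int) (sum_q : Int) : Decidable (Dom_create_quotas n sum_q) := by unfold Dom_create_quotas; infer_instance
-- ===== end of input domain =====

-- B distributes greedily: each agent takes the ceiling of remaining/agents-left (no global
-- quotient/remainder); it differs from A exactly on n>0 with negative sum_q not divisible by n
-- (stated as D_), where A's trunc-div/floor-mod mix yields quotas not summing to sum_q.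


-- ===== PORT A =====
-- `int(sum_q / n)` is Python float division truncated toward zero; on Dom (|sum_q| ≤ 2^31 ≪ 2^53)
-- the float quotient truncates to exactly Int.tdiv, which is how it is ported (exact on Dom).
def create_quotas (n : Int) (sum_q : Int) : List Int :=
  let quotient := Int.tdiv sum_q n
  let remainder := PySem.Int.mod sum_q n
  (PySem.List.pyRange 0 n 1).foldl
    (fun quotas i =>
      let quotas' := quotas ++ [quotient]
      if i < remainder then quotas'.set i.toNat (quotas'.getD i.toNat 0 + 1) else quotas')
    []

-- ===== PORT B =====
-- the `while k > 0` loop of Source B: append ceil(remaining/k), subtract it, decrement k;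
-- the loop runs exactly k.toNat times, which is the structural fuel used here.
def pvAltLoop (quotas : List Int) (remaining : Int) : Nat → List Int
  | 0 => quotas
  | m + 1 =>
    let share := -(PySem.Int.floordiv (-remaining) ((m : Int) + 1))
    pvAltLoop (quotas ++ [share]) (remaining - share) m

def create_quotas_alt (n : Int) (sum_q : Int) : List Int :=
  pvAltLoop [] sum_q n.toNat

-- ===== PRECONDITION & SPEC =====
-- Pre_ excludes exactly n = 0, where Python A raises ZeroDivisionError.
def Pre_create_quotas (n : Int) (sum_q : Int) : Prop := n ≠ 0
instance (n : Int) (sum_q : Int) : Decidable (Pre_create_quotas n sum_q) := by unfold Pre_create_quotas; infer_instance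
def pvWitness_create_quotas : Int × Int := (3, 7)

-- For n > 0 and negative sum_q not divisible by n, A mixes truncating division with floor modulo
-- and returns quotas summing to more than sum_q (A(3,-7) = [-1,-1,-2], sum -4); B returns
-- [-2,-2,-3], which sums to sum_q as the function's purpose intends.
def D_create_quotas (n : Int) (sum_q : Int) : Prop := 0 < n ∧ sum_q < 0 ∧ ¬ (n ∣ sum_q)
instance (n : Int) (sum_q : Int) : Decidable (D_create_quotas n sum_q) := by unfold D_create_quotas; infer_instance
def Spec_create_quotas (n : Int) (sum_q : Int) (out : List Int) : Prop := ¬ D_create_quotas n sum_q → out = create_quotas_alt n sum_q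
instance (n : Int) (sum_q : Int) (out : List Int) : Decidable (Spec_create_quotas n sum_q out) := by unfold Spec_create_quotas; infer_instance
def pvDiffWitness_create_quotas : Int × Int := (3, -7)
def pvDiffWitnessOut_create_quotas : (List Int) × (List Int) := ([-1, -1, -2], [-2, -2, -3])

-- ===== CLAIM (what is proved, stated in full; the proofs are below) =====
def Claim_unchanged_create_quotas : Prop := ∀ (n : Int) (sum_q : Int), Dom_create_quotas n sum_q → Pre_create_quotas n sum_q → Spec_create_quotas n sum_q (create_quotas n sum_q)
def Claim_changed_create_quotas : Prop := Dom_create_quotas (pvDiffWitness_create_quotas.1) (pvDiffWitness_create_quotas.2) ∧ Pre_create_quotas (pvDiffWitness_create_quotas.1) (pvDiffWitness_create_quotas.2) ∧ D_create_quotas (pvDiffWitness_create_quotas.1) (pvDiffWitness_create_quotas.2) ∧ create_quotas (pvDiffWitness_create_quotas.1) (pvDiffWitness_create_quotas.2) = pvDiffWitnessOut_create_quotas.1 ∧ create_quotas_alt (pvDiffWitness_create_quotas.1) (pvDiffWitness_create_quotas.2) = pvDiffWitnessOut_create_quotas.2 ∧ pvDiffWitnessOut_create_quotas.1 ≠ 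pvDiffWitnessOut_create_quotas.2
def Claim_exact_create_quotas : Prop := ∀ (n : Int) (sum_q : Int), Dom_create_quotas n sum_q → Pre_create_quotas n sum_q → D_create_quotas n sum_q → create_quotas n sum_q ≠ create_quotas_alt n sum_q

-- ===== LEMMAS AND PROOFS =====

-- A's loop invariant: after the first m iterations the accumulator is the two replicated blocks.
theorem create_quotas_loop_inv (q r : Int) (m : Nat) :
    (PySem.List.pyRange 0 m 1).foldl
      (fun quotas i =>
        let quotas' := quotas ++ [q]
        if i < r then quotas'.set i.toNat (quotas'.getD i.toNat 0 + 1) else quotas')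
      []
    = List.replicate (min m r.toNat) (q + 1) ++ List.replicate (m - min m r.toNat) q := by
  induction m with
  | zero => simp [PySem.List.pyRange_one_eq_nil]
  | succ m ih =>
    have hcast : ((m + 1 : Nat) : Int) = (m : Int) + 1 := by push_cast; ring
    rw [hcast, PySem.List.pyRange_one_succ_right (by positivity), List.foldl_append, ih]
    simp only [List.foldl_cons, List.foldl_nil]
    by_cases h : (m : Int) < r
    · have hm : m < r.toNat := by omega
      have hmin : min m r.toNat = m := by omega
      have hmin' : min (m + 1) r.toNat = m + 1 := by omega
      simp only [if_pos h, hmin, hmin', Nat.sub_self]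
      have hlen : (List.replicate m (q + 1)).length = m := List.length_replicate
      simp [Int.toNat_natCast, List.set_append_right, hlen,
            List.replicate_succ' (n := m)]
    · have hm : r.toNat ≤ m := by omega
      have hmin : min m r.toNat = r.toNat := by omega
      have hmin' : min (m + 1) r.toNat = r.toNat := by omega
      simp only [if_neg h, hmin, hmin']
      rw [List.append_assoc, ← List.replicate_succ' (n := m - r.toNat)]
      congr 2
      omega

-- A's value for n > 0, in terms of its truncating quotient and floor remainder.
theorem create_quotas_closed (n s : Int) (hn : 0 < n) :
    create_quotas n s
      = List.replicate (PySem.Int.mod s n).toNat (Int.tdiv s n + 1)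
        ++ List.replicate (n.toNat - (PySem.Int.mod s n).toNat) (Int.tdiv s n) := by
  have hr0 : 0 ≤ PySem.Int.mod s n := PySem.Int.mod_nonneg _ hn
  have hrn : PySem.Int.mod s n < n := PySem.Int.mod_lt _ hn
  have hn' : ((n.toNat : Nat) : Int) = n := Int.toNat_of_nonneg (by omega)
  unfold create_quotas
  rw [← hn', create_quotas_loop_inv]
  simp only [hn']
  have hmin : min n.toNat (PySem.Int.mod s n).toNat = (PySem.Int.mod s n).toNat := by omega
  rw [hmin]

-- The ceiling share taken by B's loop, when the remaining sum is k*q + r with 0 ≤ r < k.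
theorem pv_share_eq (s k q r : Int) (hk : 0 < k) (hs : s = k * q + r)
    (hr0 : 0 ≤ r) (hrk : r < k) :
    -(PySem.Int.floordiv (-s) k) = q + (if 0 < r then 1 else 0) := by
  rw [PySem.Int.neg_floordiv_neg_eq_iff_of_pos hk]
  subst hs
  split_ifs with h
  · constructor <;> nlinarith
  · constructor <;> nlinarith

-- B's loop on an exactly divisible remaining sum yields m equal shares.
theorem pvAltLoop_exact (m : Nat) (q : Int) (acc : List Int) :
    pvAltLoop acc ((m : Int) * q) m = acc ++ List.replicate m q := by
  induction m generalizing acc with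
  | zero => simp [pvAltLoop]
  | succ m ih =>
    show pvAltLoop (acc ++ [_]) _ m = _
    have hsh : -(PySem.Int.floordiv (-(((m + 1 : Nat) : Int) * q)) ((m : Int) + 1)) = q := by
      rw [pv_share_eq (((m + 1 : Nat) : Int) * q) _ q 0 (by positivity)
        (by push_cast; ring) le_rfl (by positivity)]
      simp
    rw [hsh]
    have h1 : ((m + 1 : Nat) : Int) * q - q = (m : Int) * q := by push_cast; ring
    rw [h1, ih]
    simp [List.replicate_succ]

-- B's loop invariant for a remaining sum k*q + r with 0 < r < k.
theorem pvAltLoop_main (m : Nat) : ∀ (q r : Int) (acc : List Int), 0 < r → r < (m : Int) →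
    pvAltLoop acc ((m : Int) * q + r) m
      = acc ++ List.replicate r.toNat (q + 1) ++ List.replicate (m - r.toNat) q := by
  induction m with
  | zero => intro q r acc h1 h2; omega
  | succ m ih =>
    intro q r acc hr0 hrm
    show pvAltLoop (acc ++ [_]) _ m = _
    have hsh : -(PySem.Int.floordiv (-(((m + 1 : Nat) : Int) * q + r)) ((m : Int) + 1))
        = q + 1 := by
      rw [pv_share_eq _ _ q r (by positivity) (by push_cast; ring) (le_of_lt hr0)
        (by push_cast at hrm ⊢; omega)]
      simp [hr0]
    rw [hsh]
    by_cases h1 : 0 < r - 1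
    · have hrem : ((m + 1 : Nat) : Int) * q + r - (q + 1) = (m : Int) * q + (r - 1) := by
        push_cast; ring
      rw [hrem, ih q (r - 1) _ h1 (by push_cast at hrm ⊢; omega)]
      have hr : r.toNat = (r - 1).toNat + 1 := by omega
      have hm : (m + 1) - r.toNat = m - (r - 1).toNat := by omega
      rw [hr, List.replicate_succ]
      have hm2 : m + 1 - ((r - 1).toNat + 1) = m - (r - 1).toNat := by omega
      rw [hm2]
      simp
    · have hr1 : r = 1 := by omega
      subst hr1
      have hrem : ((m + 1 : Nat) : Int) * q + 1 - (q + 1) = (m : Int) * q := by push_cast; ring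
      rw [hrem, pvAltLoop_exact]
      simp

-- B's value for n > 0, in terms of the floor quotient and remainder of the whole sum.
theorem create_quotas_alt_closed (n s : Int) (hn : 0 < n) :
    create_quotas_alt n s
      = List.replicate (PySem.Int.mod s n).toNat (PySem.Int.floordiv s n + 1)
        ++ List.replicate (n.toNat - (PySem.Int.mod s n).toNat) (PySem.Int.floordiv s n) := by
  have hr0 : 0 ≤ PySem.Int.mod s n := PySem.Int.mod_nonneg _ hn
  have hrn : PySem.Int.mod s n < n := PySem.Int.mod_lt _ hn
  have hsum : PySem.Int.floordiv s n * n + PySem.Int.mod s n = s :=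
    PySem.Int.floordiv_mul_add_mod s n
  have hn' : ((n.toNat : Nat) : Int) = n := Int.toNat_of_nonneg (by omega)
  unfold create_quotas_alt
  by_cases hr : 0 < PySem.Int.mod s n
  · have key := pvAltLoop_main n.toNat (PySem.Int.floordiv s n) (PySem.Int.mod s n) [] hr
      (by rw [hn']; exact hrn)
    rw [show ((n.toNat : Nat) : Int) * PySem.Int.floordiv s n + PySem.Int.mod s n = s by
      rw [hn']; linarith [hsum]] at key
    rw [key]; simp
  · have hr0' : PySem.Int.mod s n = 0 := by omega
    have key := pvAltLoop_exact n.toNat (PySem.Int.floordiv s n) []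
    rw [show ((n.toNat : Nat) : Int) * PySem.Int.floordiv s n = s by
      rw [hn']; linarith [hsum]] at key
    rw [key]; simp [hr0']

-- tdiv agrees with floordiv exactly when s ≥ 0 or n divides s (n > 0).
theorem pv_tdiv_eq_floordiv (n s : Int) (hn : 0 < n) (h : 0 ≤ s ∨ n ∣ s) :
    Int.tdiv s n = PySem.Int.floordiv s n := by
  have h1 : Int.tdiv s n = s / n := by
    rw [Int.tdiv_eq_ediv]; simp [h]
  have h2 : PySem.Int.floordiv s n = Int.fdiv s n := rfl
  rw [h1, h2, Int.fdiv_eq_ediv]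
  simp [le_of_lt hn]

-- inside D_: tdiv is one more than floordiv.
theorem pv_tdiv_eq_floordiv_add_one (n s : Int) (hn : 0 < n) (hs : s < 0) (hnd : ¬ n ∣ s) :
    Int.tdiv s n = PySem.Int.floordiv s n + 1 := by
  have h1 : Int.tdiv s n = s / n + 1 := by
    rw [Int.tdiv_eq_ediv, if_neg (by push_neg; exact ⟨by omega, hnd⟩), Int.sign_eq_one_of_pos hn]
  have h2 : PySem.Int.floordiv s n = Int.fdiv s n := rfl
  rw [h1, h2, Int.fdiv_eq_ediv]
  simp [le_of_lt hn]

-- ===== VERDICT (by name: the statements are the Claim_ definitions above) =====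
theorem create_quotas_spec : Claim_unchanged_create_quotas := by
  intro n s _ hpre hnD
  rcases lt_or_gt_of_ne hpre with hneg | hpos
  · -- n < 0: A's range is empty, B's loop does not run
    rw [show create_quotas n s = [] by
          unfold create_quotas; rw [PySem.List.pyRange_one_eq_nil (by omega)]; rfl]
    unfold create_quotas_alt
    rw [show n.toNat = 0 by omega]
    rfl
  · have h : 0 ≤ s ∨ n ∣ s := by
      by_contra hc
      push_neg at hc
      exact hnD ⟨hpos, by omega, hc.2⟩
    rw [create_quotas_closed n s hpos, create_quotas_alt_closed n s hpos,
        pv_tdiv_eq_floordiv n s hpos h]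

theorem create_quotas_changed : Claim_changed_create_quotas := by
  unfold Claim_changed_create_quotas; decide

theorem create_quotas_tight : Claim_exact_create_quotas := by
  intro n s _ _ hD heq
  obtain ⟨hn, hs, hnd⟩ := hD
  have hr : 0 < PySem.Int.mod s n := by
    have := PySem.Int.mod_nonneg s hn
    have hne : PySem.Int.mod s n ≠ 0 := fun h0 =>
      hnd ((PySem.Int.mod_eq_zero_iff_dvd s n).mp h0)
    omega
  rw [create_quotas_closed n s hn, create_quotas_alt_closed n s hn,
      pv_tdiv_eq_floordiv_add_one n s hn hs hnd] at heq
  have hm : (PySem.Int.mod s n).toNat = ((PySem.Int.mod s n).toNat - 1) + 1 := by omega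
  rw [hm] at heq
  simp only [List.replicate_succ, List.cons_append, List.cons.injEq] at heq
  omega
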